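-- pv_equiv track=rewrite | github.com/vladsakhanda/Python_for_Data_Quality_Engineers | HomeTask3.py | count_whitespaces_and_capitalize
-- ===== SOURCE A (Python) =====
-- def count_whitespaces_and_capitalize(text):
--     """Count whitespaces and capitalize the first letter of each sentence."""
--     new_text = ''
--     number_of_whitespace_characters = 0
--     make_upper_case_next_word = True
--
--     for symbol in text:
--         if symbol.isspace():
--             number_of_whitespace_characters += 1
--
--         if make_upper_case_next_word and symbol.isalpha():
--             symbol = symbol.upper()
--             make_upper_case_next_word = False
--         if symbol in ('.', ';', ':'):
--             make_upper_case_next_word = True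
--
--         new_text += symbol
--
--     return new_text, number_of_whitespace_characters
-- ===== SOURCE B (Python) =====
-- def _cap_pending(text, i):
--     """Scan backwards from position i: True iff a sentence terminator
--     (or the start of the text) is met before any letter."""
--     for j in range(i - 1, -1, -1):
--         c = text[j]
--         if c in ('.', ';', ':'):
--             return True
--         if c.isalpha():
--             return False
--     return True
--
--
-- def count_whitespaces_and_capitalize(text):
--     """Count whitespaces and capitalize the first letter of each sentence."""
--     count = sum(1 for c in text if c.isspace())
--     new_text = ''.join(
--         c.upper() if c.isalpha() and _cap_pending(text, i) else c
--         for i, c in enumerate(text)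
--     )
--     return new_text, count
-- ===== Notes on version B (the rewrite author's own statement) =====
-- stated objective: alternative
-- what changed: Replaces A's single forward loop that threads a capitalize-next flag and a running whitespace counter with two independent passes: a filter-based whitespace count, and a positional rebuild that decides each letter's case by scanning backwards from its position for a sentence terminator before any letter.
import Mathlib
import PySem

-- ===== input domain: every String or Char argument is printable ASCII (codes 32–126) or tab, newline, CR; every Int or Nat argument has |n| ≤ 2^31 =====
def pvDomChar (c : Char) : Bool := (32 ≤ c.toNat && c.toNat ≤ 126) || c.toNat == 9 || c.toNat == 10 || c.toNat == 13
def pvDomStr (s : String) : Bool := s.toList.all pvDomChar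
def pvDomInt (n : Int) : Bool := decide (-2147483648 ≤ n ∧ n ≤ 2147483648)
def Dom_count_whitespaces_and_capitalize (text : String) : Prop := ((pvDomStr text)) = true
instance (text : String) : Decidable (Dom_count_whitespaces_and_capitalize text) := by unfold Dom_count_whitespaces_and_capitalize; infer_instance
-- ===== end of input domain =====

-- B separates the two concerns: it counts whitespace with one filter pass and rebuilds the text
-- positionally, deciding each letter's case by scanning backwards from its position for a
-- terminator-before-letter, instead of A's single forward loop carrying a flag (objective: alternative).


-- ===== PORT A =====
-- loop body of A's single for-loop; state = (new_text, number_of_whitespace_characters, make_upper_case_next_word)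
def pvStepA (st : List Char × Int × Bool) (symbol : Char) : List Char × Int × Bool :=
  let n := if PySem.Chars.isspace symbol then st.2.1 + 1 else st.2.1
  let p := if st.2.2 && PySem.Chars.isalpha symbol then (PySem.Chars.upperChar symbol, false)
           else (symbol, st.2.2)
  let flag := if p.1 ∈ (['.', ';', ':'] : List Char) then true else p.2
  (st.1 ++ [p.1], n, flag)

def count_whitespaces_and_capitalize (text : String) : String × Int :=
  let r := text.toList.foldl pvStepA ([], 0, true)
  (String.mk r.1, r.2.1)

-- ===== PORT B =====
-- _cap_pending: for j in range(i-1, -1, -1): … text[j] …  — the downward index loop becomes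
-- structural recursion on the index i (enumerate indices are ≥ 0, so the Nat index is exact;
-- j = i-1 is always in range, so text[j] is List.getD with an irrelevant default)
def pvCapPending (cs : List Char) : Nat → Bool
  | 0 => true
  | Nat.succ j =>
    let c := cs.getD j ' '
    if c ∈ (['.', ';', ':'] : List Char) then true
    else if PySem.Chars.isalpha c then false
    else pvCapPending cs j

def count_whitespaces_and_capitalize_alt (text : String) : String × Int :=
  let cs := text.toList
  let count : Int := ((cs.filter (fun c => PySem.Chars.isspace c)).length : Int)
  let newChars := (PySem.List.enumerate cs).map (fun p =>
    if PySem.Chars.isalpha p.2 && pvCapPending cs p.1.toNat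
    then PySem.Chars.upperChar p.2 else p.2)
  (String.mk newChars, count)

-- ===== PRECONDITION & SPEC =====
def Spec_count_whitespaces_and_capitalize (text : String) (out : String × Int) : Prop := out = count_whitespaces_and_capitalize_alt text
instance (text : String) (out : String × Int) : Decidable (Spec_count_whitespaces_and_capitalize text out) := by unfold Spec_count_whitespaces_and_capitalize; infer_instance

-- ===== CLAIM (what is proved, stated in full; the proofs are below) =====
def Claim_equal_count_whitespaces_and_capitalize : Prop := ∀ (text : String), Dom_count_whitespaces_and_capitalize text → Spec_count_whitespaces_and_capitalize text (count_whitespaces_and_capitalize text)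

-- ===== LEMMAS AND PROOFS =====

-- the backward scan, reformulated on the reversed already-read prefix (proof-side view of _cap_pending)
def pvCapRev : List Char → Bool
  | [] => true
  | c :: rest =>
    if c ∈ (['.', ';', ':'] : List Char) then true
    else if PySem.Chars.isalpha c then false
    else pvCapRev rest

-- B's per-character transform, with the reversed already-read prefix as explicit context
def pvBmap (ctx : List Char) : List Char → List Char
  | [] => []
  | c :: cs =>
    (if PySem.Chars.isalpha c && pvCapRev ctx then PySem.Chars.upperChar c else c)
      :: pvBmap (c :: ctx) cs

theorem pvTerm_not_alpha (c : Char) (h : c ∈ (['.', ';', ':'] : List Char)) :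
    PySem.Chars.isalpha c = false := by
  fin_cases h <;> decide

theorem pvAlpha_toNat (c : Char) (h : PySem.Chars.isalpha c = true) :
    (65 ≤ c.toNat ∧ c.toNat ≤ 90) ∨ (97 ≤ c.toNat ∧ c.toNat ≤ 122) := by
  simp only [PySem.Chars.isalpha, PySem.Chars.isupper, PySem.Chars.islower,
    Bool.or_eq_true, Bool.and_eq_true, decide_eq_true_eq, Char.le_def,
    UInt32.le_iff_toNat_le] at h
  have h1 : ('A').val.toNat = 65 := rfl
  have h2 : ('Z').val.toNat = 90 := rfl
  have h3 : ('a').val.toNat = 97 := rfl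
  have h4 : ('z').val.toNat = 122 := rfl
  have h5 : c.toNat = c.val.toNat := rfl
  omega

theorem pvNotLower_of_upper (c : Char) (hc : 65 ≤ c.toNat ∧ c.toNat ≤ 90) :
    PySem.Chars.islower c = false := by
  simp only [PySem.Chars.islower, Char.le_def, UInt32.le_iff_toNat_le,
    Bool.and_eq_false_iff, decide_eq_false_iff_not, not_le]
  have h3 : ('a').val.toNat = 97 := rfl
  have h5 : c.toNat = c.val.toNat := rfl
  left; omega

theorem pvLower_of_lower (c : Char) (hc : 97 ≤ c.toNat ∧ c.toNat ≤ 122) :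
    PySem.Chars.islower c = true := by
  simp only [PySem.Chars.islower, Bool.and_eq_true, decide_eq_true_eq, Char.le_def,
    UInt32.le_iff_toNat_le]
  have h3 : ('a').val.toNat = 97 := rfl
  have h4 : ('z').val.toNat = 122 := rfl
  have h5 : c.toNat = c.val.toNat := rfl
  omega

theorem pvUpper_not_term (c : Char) (h : PySem.Chars.isalpha c = true) :
    PySem.Chars.upperChar c ∉ (['.', ';', ':'] : List Char) := by
  have hb : 65 ≤ (PySem.Chars.upperChar c).toNat ∧ (PySem.Chars.upperChar c).toNat ≤ 90 := by
    rcases pvAlpha_toNat c h with hc | hc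
    · rw [PySem.Chars.upperChar, pvNotLower_of_upper c hc]; simpa using hc
    · rw [PySem.Chars.upperChar, pvLower_of_lower c hc]
      simp only [if_pos]
      rw [Char.toNat_ofNat, if_pos]
      · omega
      · exact Or.inl (by omega)
  intro hm
  simp only [List.mem_cons, List.not_mem_nil, or_false] at hm
  rcases hm with hm | hm | hm <;> rw [hm] at hb <;> revert hb <;> decide

-- one step of A's loop, with the flag expressed through pvCapPending of the reversed prefix
theorem pvStepA_eq (acc : List Char) (n : Int) (ctx : List Char) (c : Char) :
    pvStepA (acc, n, pvCapRev ctx) c =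
      (acc ++ [if PySem.Chars.isalpha c && pvCapRev ctx then PySem.Chars.upperChar c else c],
       (if PySem.Chars.isspace c then n + 1 else n),
       pvCapRev (c :: ctx)) := by
  unfold pvStepA
  by_cases hA : PySem.Chars.isalpha c = true
  · by_cases hF : pvCapRev ctx = true
    · simp only [hA, hF, Bool.and_self, if_pos]
      rw [if_neg (pvUpper_not_term c hA)]
      have : pvCapRev (c :: ctx) = false := by
        rw [pvCapRev]
        rw [if_neg (fun hm => by simp [pvTerm_not_alpha c hm] at hA), if_pos hA]
      simp [this]
    · have hF' : pvCapRev ctx = false := by simpa using hF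
      have hc : pvCapRev (c :: ctx) = if c ∈ (['.', ';', ':'] : List Char) then true else false := by
        rw [pvCapRev]; split
        · rfl
        · simp
      simp only [hF', Bool.and_false, if_neg Bool.false_ne_true, hc]
      by_cases ht : c ∈ (['.', ';', ':'] : List Char) <;> simp [ht]
  · simp only [Bool.not_eq_true] at hA
    simp only [hA, Bool.and_false, if_neg Bool.false_ne_true]
    have : pvCapRev (c :: ctx) = if c ∈ (['.', ';', ':'] : List Char) then true else pvCapRev ctx := by
      rw [pvCapRev]; split
      · rfl
      · rw [hA]; simp
    simp [this]

theorem pvLoopA (l : List Char) : ∀ (ctx acc : List Char) (n : Int),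
    l.foldl pvStepA (acc, n, pvCapRev ctx) =
      (acc ++ pvBmap ctx l,
       n + ((l.filter (fun c => PySem.Chars.isspace c)).length : Int),
       pvCapRev (l.reverse ++ ctx)) := by
  induction l with
  | nil => intro ctx acc n; simp [pvBmap]
  | cons c cs ih =>
    intro ctx acc n
    rw [List.foldl_cons, pvStepA_eq, ih (c :: ctx)]
    refine congrArg₂ Prod.mk ?_ (congrArg₂ Prod.mk ?_ ?_)
    · simp [pvBmap]
    · rw [List.filter_cons]
      by_cases hs : PySem.Chars.isspace c = true <;> simp [hs] <;> ring
    · simp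

-- the index-based backward scan equals pvCapRev of the reversed prefix
theorem pvCapPending_eq (cs : List Char) : ∀ (i : Nat), i ≤ cs.length →
    pvCapPending cs i = pvCapRev ((cs.take i).reverse) := by
  intro i
  induction i with
  | zero => intro _; simp [pvCapPending, pvCapRev]
  | succ j ih =>
    intro h
    have hj : j < cs.length := by omega
    rw [pvCapPending]
    have ht : (cs.take (j + 1)).reverse = cs[j] :: (cs.take j).reverse := by
      rw [List.take_succ, List.getElem?_eq_getElem hj]
      simp
    rw [ht, pvCapRev]
    simp only [List.getD_eq_getElem _ _ hj]
    rw [ih (by omega)]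

-- B's enumerate/map pass computes pvBmap
theorem pvAltMap (l : List Char) : ∀ (pre : List Char),
    (PySem.List.enumerate l (pre.length : Int)).map (fun p =>
        if PySem.Chars.isalpha p.2 &&
            pvCapPending (pre ++ l) p.1.toNat
        then PySem.Chars.upperChar p.2 else p.2)
      = pvBmap pre.reverse l := by
  induction l with
  | nil => intro pre; simp [PySem.List.enumerate, pvBmap]
  | cons c cs ih =>
    intro pre
    rw [PySem.List.enumerate_cons, List.map_cons, pvBmap]
    refine congrArg₂ List.cons ?_ ?_
    · have h0 : ((pre.length : Int)).toNat = pre.length := by simp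
      rw [h0, pvCapPending_eq _ _ (by simp), List.take_left]
    · have h1 : ((pre.length : Int) + 1) = (((pre ++ [c]).length : Nat) : Int) := by
        simp
      have h2 : pre ++ c :: cs = (pre ++ [c]) ++ cs := by simp
      rw [h1, h2, ih (pre ++ [c])]
      simp

-- ===== VERDICT (by name: the statement is the Claim_ definition above) =====
theorem count_whitespaces_and_capitalize_spec : Claim_equal_count_whitespaces_and_capitalize := by
  intro text _
  unfold Spec_count_whitespaces_and_capitalize
  unfold count_whitespaces_and_capitalize count_whitespaces_and_capitalize_alt
  rw [show (([], 0, true) : List Char × Int × Bool) = ([], 0, pvCapRev []) from rfl,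
      pvLoopA text.toList [] [] 0]
  have hmap : (PySem.List.enumerate text.toList).map (fun p =>
      if PySem.Chars.isalpha p.2 && pvCapPending text.toList p.1.toNat
      then PySem.Chars.upperChar p.2 else p.2) = pvBmap [] text.toList :=
    pvAltMap text.toList []
  dsimp only
  rw [hmap]
  simp
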